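-- pv_equiv track=rewrite | github.com/bcgsc/ntLink | bin/ntlink_paf_output.py | break_mapping_blocks
-- ===== SOURCE A (Python) =====
-- def break_mapping_blocks(sorted_ctg_pos: list, breaks: set, filters: set) -> list:
--     "Break the mapping blocks at detected locations"
--     return_mapping_blocks = []
--     current_mapping_block = []
--     for i, mapping in enumerate(sorted_ctg_pos):
--         if i in filters:
--             continue
--         if i in breaks:
--             return_mapping_blocks.append(current_mapping_block)
--             current_mapping_block = [mapping]
--         else:
--             current_mapping_block.append(mapping)
--     return_mapping_blocks.append(current_mapping_block)
--
--     return return_mapping_blocks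
-- ===== SOURCE B (Python) =====
-- def break_mapping_blocks(sorted_ctg_pos: list, breaks: set, filters: set) -> list:
--     "Break the mapping blocks at detected locations (slice-based reconstruction)"
--     kept = []
--     cuts = []
--     for i, mapping in enumerate(sorted_ctg_pos):
--         if i in filters:
--             continue
--         if i in breaks:
--             cuts.append(len(kept))
--         kept.append(mapping)
--     blocks = []
--     prev = 0
--     for c in cuts:
--         blocks.append(kept[prev:c])
--         prev = c
--     blocks.append(kept[prev:])
--     return blocks
-- ===== Notes on version B (the rewrite author's own statement) =====
-- stated objective: alternative
-- what changed: Instead of growing blocks element-by-element in one stateful loop, B first records the surviving elements plus cut offsets within them, then builds every block by slicing between consecutive cut points.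
import Mathlib
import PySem

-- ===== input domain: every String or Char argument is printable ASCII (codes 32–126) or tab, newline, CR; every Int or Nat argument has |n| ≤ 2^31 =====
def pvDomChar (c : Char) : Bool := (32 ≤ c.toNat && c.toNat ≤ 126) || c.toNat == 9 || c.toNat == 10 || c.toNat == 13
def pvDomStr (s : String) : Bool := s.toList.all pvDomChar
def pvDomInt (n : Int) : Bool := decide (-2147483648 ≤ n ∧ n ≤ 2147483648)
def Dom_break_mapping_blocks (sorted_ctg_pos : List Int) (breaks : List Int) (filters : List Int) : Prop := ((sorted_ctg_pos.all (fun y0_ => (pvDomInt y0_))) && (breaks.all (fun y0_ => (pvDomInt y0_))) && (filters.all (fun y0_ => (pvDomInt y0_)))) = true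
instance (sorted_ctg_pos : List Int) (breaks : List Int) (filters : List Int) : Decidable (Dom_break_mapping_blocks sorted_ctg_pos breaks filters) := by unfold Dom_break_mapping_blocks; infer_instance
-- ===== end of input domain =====

-- B replaces A's single stateful block-growing loop by a kept-elements/cut-offsets pass followed by slicing (alternative decomposition, same cost).

-- ===== PORT A =====
-- A's for-loop over enumerate(sorted_ctg_pos), state (return_mapping_blocks, current_mapping_block)
def bmbLoopA (breaks filters : List Int) : Nat → List (List Int) → List Int → List Int → (List (List Int) × List Int)
  | _, ret, cur, [] => (ret, cur)
  | i, ret, cur, m :: rest =>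
    if (i : Int) ∈ filters then bmbLoopA breaks filters (i+1) ret cur rest
    else if (i : Int) ∈ breaks then bmbLoopA breaks filters (i+1) (ret ++ [cur]) [m] rest
    else bmbLoopA breaks filters (i+1) ret (cur ++ [m]) rest

def break_mapping_blocks (sorted_ctg_pos : List Int) (breaks : List Int) (filters : List Int) : List (List Int) :=
  let st := bmbLoopA breaks filters 0 [] [] sorted_ctg_pos
  st.1 ++ [st.2]

-- ===== PORT B =====
-- B's first loop: surviving elements `kept` and cut offsets `cuts` (positions within kept)
def bmbKept (breaks filters : List Int) : Nat → List Int → List Nat → List Int → (List Int × List Nat)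
  | _, kept, cuts, [] => (kept, cuts)
  | i, kept, cuts, m :: rest =>
    if (i : Int) ∈ filters then bmbKept breaks filters (i+1) kept cuts rest
    else bmbKept breaks filters (i+1) (kept ++ [m])
      (if (i : Int) ∈ breaks then cuts ++ [kept.length] else cuts) rest

-- B's second loop: blocks via Python slices kept[prev:c], final kept[prev:]
def bmbSlices (kept : List Int) : List (List Int) → Nat → List Nat → List (List Int)
  | blocks, prev, [] => blocks ++ [PySem.List.slice kept (some (prev : Int)) none]
  | blocks, prev, c :: cs =>
    bmbSlices kept (blocks ++ [PySem.List.slice kept (some (prev : Int)) (some (c : Int))]) c cs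

def break_mapping_blocks_alt (sorted_ctg_pos : List Int) (breaks : List Int) (filters : List Int) : List (List Int) :=
  let st := bmbKept breaks filters 0 [] [] sorted_ctg_pos
  bmbSlices st.1 [] 0 st.2

-- ===== PRECONDITION & SPEC =====
def Spec_break_mapping_blocks (sorted_ctg_pos : List Int) (breaks : List Int) (filters : List Int) (out : List (List Int)) : Prop := out = break_mapping_blocks_alt sorted_ctg_pos breaks filters
instance (sorted_ctg_pos : List Int) (breaks : List Int) (filters : List Int) (out : List (List Int)) : Decidable (Spec_break_mapping_blocks sorted_ctg_pos breaks filters out) := by unfold Spec_break_mapping_blocks; infer_instance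

-- ===== CLAIM (what is proved, stated in full; the proofs are below) =====
def Claim_equal_break_mapping_blocks : Prop := ∀ (sorted_ctg_pos : List Int) (breaks : List Int) (filters : List Int), Dom_break_mapping_blocks sorted_ctg_pos breaks filters → Spec_break_mapping_blocks sorted_ctg_pos breaks filters (break_mapping_blocks sorted_ctg_pos breaks filters)

-- ===== LEMMAS AND PROOFS =====

-- cut positions corresponding to A's finished blocks: running totals of their lengths, starting at offset n
def cutsOf : List (List Int) → Nat → List Nat
  | [], _ => []
  | r :: rs, n => (n + r.length) :: cutsOf rs (n + r.length)

theorem cutsOf_append (xs ys : List (List Int)) (n : Nat) :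
    cutsOf (xs ++ ys) n = cutsOf xs n ++ cutsOf ys (n + xs.flatten.length) := by
  induction xs generalizing n with
  | nil => simp [cutsOf]
  | cons r rs ih => simp [cutsOf, ih, Nat.add_assoc]

-- B's first loop tracks A's loop: kept = flatten ret ++ cur, cuts = cutsOf ret 0
theorem bmbKept_eq_loopA (breaks filters : List Int) (rest : List Int) :
    ∀ (i : Nat) (ret : List (List Int)) (cur : List Int),
      bmbKept breaks filters i (ret.flatten ++ cur) (cutsOf ret 0) rest =
        ((bmbLoopA breaks filters i ret cur rest).1.flatten ++ (bmbLoopA breaks filters i ret cur rest).2,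
         cutsOf (bmbLoopA breaks filters i ret cur rest).1 0) := by
  induction rest with
  | nil => intro i ret cur; simp [bmbKept, bmbLoopA]
  | cons m rest ih =>
    intro i ret cur
    by_cases hf : (i : Int) ∈ filters
    · simp [bmbKept, bmbLoopA, hf, ih]
    · by_cases hb : (i : Int) ∈ breaks
      · have h1 : ret.flatten ++ cur ++ [m] = (ret ++ [cur]).flatten ++ [m] := by simp
        have h2 : cutsOf ret 0 ++ [(ret.flatten ++ cur).length] = cutsOf (ret ++ [cur]) 0 := by
          simp [cutsOf_append, cutsOf]
        have := ih (i+1) (ret ++ [cur]) [m]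
        simp only [bmbKept, bmbLoopA, hf, hb, if_false, if_true] at *
        rw [h1, h2]
        exact this
      · have h1 : ret.flatten ++ cur ++ [m] = ret.flatten ++ (cur ++ [m]) := by simp
        have := ih (i+1) ret (cur ++ [m])
        simp only [bmbKept, bmbLoopA, hf, hb, if_false] at *
        rw [h1]
        exact this

-- B's second loop reconstructs A's blocks from kept and cutsOf
theorem bmbSlices_cutsOf (ret : List (List Int)) :
    ∀ (pre cur : List Int) (blocks : List (List Int)),
      bmbSlices (pre ++ ret.flatten ++ cur) blocks pre.length (cutsOf ret pre.length) =
        blocks ++ ret ++ [cur] := by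
  induction ret with
  | nil =>
    intro pre cur blocks
    simp [bmbSlices, cutsOf, PySem.List.slice_from_natCast]
  | cons r rs ih =>
    intro pre cur blocks
    have hk : pre ++ (r :: rs).flatten ++ cur = (pre ++ r) ++ rs.flatten ++ cur := by simp
    have hslice : PySem.List.slice ((pre ++ r) ++ rs.flatten ++ cur)
        (some (pre.length : Int)) (some ((pre.length + r.length : Nat) : Int)) = r := by
      rw [PySem.List.slice_natCast]
      simp
    have hlen : (pre ++ r).length = pre.length + r.length := by simp
    have := ih (pre ++ r) cur (blocks ++ [r])
    rw [hlen] at this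
    simp only [cutsOf, bmbSlices, hk, hslice]
    rw [this]
    simp

-- ===== VERDICT (by name: the statement is the Claim_ definition above) =====
theorem break_mapping_blocks_spec : Claim_equal_break_mapping_blocks := by
  intro s breaks filters _
  unfold Spec_break_mapping_blocks break_mapping_blocks break_mapping_blocks_alt
  have h1 := bmbKept_eq_loopA breaks filters s 0 [] []
  simp only [List.flatten_nil, List.nil_append, cutsOf] at h1
  rw [h1]
  have h2 := bmbSlices_cutsOf (bmbLoopA breaks filters 0 [] [] s).1 [] (bmbLoopA breaks filters 0 [] [] s).2 []
  simpa using h2.symm
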